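-- pv_equiv track=rewrite | github.com/onurkargacier/msctrackingsystemautomation | src/main.py | a1_range
-- ===== SOURCE A (Python) =====
-- def a1_range(col_start_idx_zero: int, row_start_one: int, col_end_idx_zero: int, row_end_one: int) -> str:
--     """
--     0-based sütun, 1-based satırdan A1 aralık üretir (kapalı aralık):
--     """
--     def col_letter(idx):
--         s = ""
--         idx += 1
--         while idx:
--             idx, r = divmod(idx - 1, 26)
--             s = chr(65 + r) + s
--         return s
--
--     start = f"{col_letter(col_start_idx_zero)}{row_start_one}"
--     end = f"{col_letter(col_end_idx_zero)}{row_end_one}"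
--     return f"{start}:{end}"
-- ===== SOURCE B (Python) =====
-- def a1_range(col_start_idx_zero: int, row_start_one: int, col_end_idx_zero: int, row_end_one: int) -> str:
--     def digits(n):
--         # recursive base-26 conversion (bijective base 26); '' for n <= 0
--         if n <= 0:
--             return ""
--         q, r = divmod(n - 1, 26)
--         return digits(q) + chr(65 + r)
--
--     def col_letter(idx):
--         return digits(idx + 1)
--
--     start = f"{col_letter(col_start_idx_zero)}{row_start_one}"
--     end = f"{col_letter(col_end_idx_zero)}{row_end_one}"
--     return f"{start}:{end}"
-- ===== Notes on version B (the rewrite author's own statement) =====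
-- stated objective: alternative
-- what changed: Replaces the string-accumulating while-loop for column letters by a recursive bijective-base-26 digit function (helper(q) + chr(65+r), base case '' at n <= 0), keeping the outer assembly unchanged.
import Mathlib
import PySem

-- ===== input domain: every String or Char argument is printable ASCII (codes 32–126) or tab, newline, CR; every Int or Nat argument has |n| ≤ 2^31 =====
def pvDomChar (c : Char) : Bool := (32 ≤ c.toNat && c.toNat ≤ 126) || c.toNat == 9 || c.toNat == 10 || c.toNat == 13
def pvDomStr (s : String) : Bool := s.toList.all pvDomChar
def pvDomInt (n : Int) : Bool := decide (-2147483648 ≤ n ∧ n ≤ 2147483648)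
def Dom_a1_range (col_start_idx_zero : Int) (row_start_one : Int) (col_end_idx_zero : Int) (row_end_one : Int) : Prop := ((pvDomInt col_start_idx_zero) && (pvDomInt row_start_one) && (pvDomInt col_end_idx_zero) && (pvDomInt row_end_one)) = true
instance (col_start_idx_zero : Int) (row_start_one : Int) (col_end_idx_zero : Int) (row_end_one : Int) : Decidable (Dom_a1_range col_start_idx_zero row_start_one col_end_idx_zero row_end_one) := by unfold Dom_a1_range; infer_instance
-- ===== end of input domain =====

-- B rewrites the column-letter while-loop as a recursive bijective-base-26 digit function; same cost ("alternative").

-- ===== PORT A =====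
-- A's while-loop, fuel-guarded (fuel only makes the loop total in Lean: inside Pre_ the
-- loop runs at most idx.toNat + 1 times, so the fuel is never exhausted there).
def a1ColLoop : Nat → Int → String → String
  | 0, _, s => s
  | fuel + 1, idx, s =>
    if idx ≠ 0 then
      a1ColLoop fuel (PySem.Int.floordiv (idx - 1) 26)
        (String.mk [Char.ofNat (65 + (PySem.Int.mod (idx - 1) 26)).toNat] ++ s)
    else s

def a1ColLetter (idx : Int) : String :=
  a1ColLoop ((idx + 1).toNat + 1) (idx + 1) ""

def a1_range (col_start_idx_zero : Int) (row_start_one : Int) (col_end_idx_zero : Int) (row_end_one : Int) : String :=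
  let start := a1ColLetter col_start_idx_zero ++ PySem.Int.toStr row_start_one
  let «end» := a1ColLetter col_end_idx_zero ++ PySem.Int.toStr row_end_one
  start ++ ":" ++ «end»

-- ===== PORT B =====
def a1Digits (n : Int) : String :=
  if h : n ≤ 0 then ""
  else
    a1Digits (PySem.Int.floordiv (n - 1) 26)
      ++ String.mk [Char.ofNat (65 + (PySem.Int.mod (n - 1) 26)).toNat]
termination_by n.toNat
decreasing_by
  have h1 : PySem.Int.floordiv (n - 1) 26 = (n - 1) / 26 :=
    PySem.Int.floordiv_eq_ediv_of_pos (by omega)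
  have h2 : (n - 1) / 26 ≤ n - 1 := Int.ediv_le_self _ (by omega)
  have h3 : 0 ≤ (n - 1) / 26 := Int.ediv_nonneg (by omega) (by omega)
  omega

def a1ColLetterB (idx : Int) : String := a1Digits (idx + 1)

def a1_range_alt (col_start_idx_zero : Int) (row_start_one : Int) (col_end_idx_zero : Int) (row_end_one : Int) : String :=
  let start := a1ColLetterB col_start_idx_zero ++ PySem.Int.toStr row_start_one
  let «end» := a1ColLetterB col_end_idx_zero ++ PySem.Int.toStr row_end_one
  start ++ ":" ++ «end»

-- ===== PRECONDITION & SPEC =====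
-- A's while-loop never terminates when col index + 1 < 0 (divmod keeps the quotient negative),
-- so A diverges there; Pre_ excludes exactly those inputs.
def Pre_a1_range (col_start_idx_zero : Int) (row_start_one : Int) (col_end_idx_zero : Int) (row_end_one : Int) : Prop :=
  -1 ≤ col_start_idx_zero ∧ -1 ≤ col_end_idx_zero
instance (col_start_idx_zero : Int) (row_start_one : Int) (col_end_idx_zero : Int) (row_end_one : Int) : Decidable (Pre_a1_range col_start_idx_zero row_start_one col_end_idx_zero row_end_one) := by unfold Pre_a1_range; infer_instance

def pvWitness_a1_range : Int × Int × Int × Int := (0, 1, 27, 100)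

def Spec_a1_range (col_start_idx_zero : Int) (row_start_one : Int) (col_end_idx_zero : Int) (row_end_one : Int) (out : String) : Prop := out = a1_range_alt col_start_idx_zero row_start_one col_end_idx_zero row_end_one
instance (col_start_idx_zero : Int) (row_start_one : Int) (col_end_idx_zero : Int) (row_end_one : Int) (out : String) : Decidable (Spec_a1_range col_start_idx_zero row_start_one col_end_idx_zero row_end_one out) := by unfold Spec_a1_range; infer_instance

-- ===== CLAIM (what is proved, stated in full; the proofs are below) =====
def Claim_equal_a1_range : Prop := ∀ (col_start_idx_zero : Int) (row_start_one : Int) (col_end_idx_zero : Int) (row_end_one : Int), Dom_a1_range col_start_idx_zero row_start_one col_end_idx_zero row_end_one → Pre_a1_range col_start_idx_zero row_start_one col_end_idx_zero row_end_one → Spec_a1_range col_start_idx_zero row_start_one col_end_idx_zero row_end_one (a1_range col_start_idx_zero row_start_one col_end_idx_zero row_end_one)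

-- ===== LEMMAS AND PROOFS =====

lemma a1Digits_pos (n : Int) (hn : 0 < n) :
    a1Digits n = a1Digits (PySem.Int.floordiv (n - 1) 26)
      ++ String.mk [Char.ofNat (65 + (PySem.Int.mod (n - 1) 26)).toNat] := by
  rw [a1Digits]; simp [Int.not_le.mpr hn]

lemma a1ColLoop_eq_digits (fuel : Nat) (n : Int) (s : String)
    (hn : 0 ≤ n) (hfuel : n.toNat < fuel) :
    a1ColLoop fuel n s = a1Digits n ++ s := by
  induction fuel generalizing n s with
  | zero => omega
  | succ fuel ih =>
    by_cases h0 : n = 0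
    · subst h0
      simp [a1ColLoop, a1Digits]
    · have hpos : 0 < n := lt_of_le_of_ne hn (Ne.symm h0)
      have hq : PySem.Int.floordiv (n - 1) 26 = (n - 1) / 26 :=
        PySem.Int.floordiv_eq_ediv_of_pos (by omega)
      have h2 : (n - 1) / 26 ≤ n - 1 := Int.ediv_le_self _ (by omega)
      have h3 : 0 ≤ (n - 1) / 26 := Int.ediv_nonneg (by omega) (by omega)
      rw [a1ColLoop, if_pos h0,
        ih _ _ (by omega) (by omega),
        a1Digits_pos n hpos, String.append_assoc]

lemma a1ColLetter_eq (idx : Int) (h : -1 ≤ idx) :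
    a1ColLetter idx = a1ColLetterB idx := by
  unfold a1ColLetter a1ColLetterB
  rw [a1ColLoop_eq_digits _ _ _ (by omega) (by omega)]
  simp

-- ===== VERDICT (by name: the statement is the Claim_ definition above) =====
theorem a1_range_spec : Claim_equal_a1_range := by
  intro c1 r1 c2 r2 _ hpre
  unfold Spec_a1_range a1_range a1_range_alt
  rw [a1ColLetter_eq c1 hpre.1, a1ColLetter_eq c2 hpre.2]
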